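-- pv_equiv track=rewrite | github.com/kikeuf/setconf | src/dict.py | XPathToDictPath
-- ===== SOURCE A (Python) =====
-- def XPathToDictPath(path):
--
--     ret = "{'"
--     end = "}"
--     items = path.split('/')
--
--     for item in items:
--         if item != '':
--             ret += item + "': {'"
--             end += "}"
--     ret += "'" + end
--
--     ret = ret.replace("{''}", 'None')
--
--     return ret
-- ===== SOURCE B (Python) =====
-- def XPathToDictPath(path):
--     result = "{''}"
--     for item in reversed([i for i in path.split('/') if i != '']):
--         result = "{'" + item + "': " + result + "}"
--     return result.replace("{''}", 'None')
-- ===== Notes on version B (the rewrite author's own statement) =====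
-- stated objective: alternative
-- what changed: B builds the nested-dict string inside-out with a single accumulator, looping right-to-left over the filtered segments, instead of A's left-to-right prefix string plus a separately accumulated run of closing braces spliced on at the end.
import Mathlib
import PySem

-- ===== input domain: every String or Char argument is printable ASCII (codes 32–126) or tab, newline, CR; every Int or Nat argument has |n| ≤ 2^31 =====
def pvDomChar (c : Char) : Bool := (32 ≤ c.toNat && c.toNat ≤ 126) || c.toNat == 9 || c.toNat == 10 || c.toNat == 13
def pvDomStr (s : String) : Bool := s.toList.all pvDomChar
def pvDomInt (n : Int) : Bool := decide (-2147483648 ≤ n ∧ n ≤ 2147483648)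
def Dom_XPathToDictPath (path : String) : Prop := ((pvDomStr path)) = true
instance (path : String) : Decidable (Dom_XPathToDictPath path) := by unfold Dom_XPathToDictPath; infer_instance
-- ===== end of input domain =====

-- B builds the nested string inside-out (right-to-left, single accumulator) instead of A's
-- left-to-right prefix plus separately accumulated closing braces; alternative decomposition.

-- ===== PORT A =====
-- path.split('/') with the non-empty literal separator never fails, so .getD [] is exact
def XPathToDictPath (path : String) : String :=
  let items := (PySem.Str.split? path "/").getD []
  let st := items.foldl
    (fun (st : String × String) item =>
      if item ≠ "" then (st.1 ++ item ++ "': {'", st.2 ++ "}") else st)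
    ("{'", "}")
  PySem.Str.replace (st.1 ++ "'" ++ st.2) "{''}" "None"

-- ===== PORT B =====
def XPathToDictPath_alt (path : String) : String :=
  let items := ((PySem.Str.split? path "/").getD []).filter (fun i => i ≠ "")
  let result := items.reverse.foldl
    (fun acc item => "{'" ++ item ++ "': " ++ acc ++ "}") "{''}"
  PySem.Str.replace result "{''}" "None"

-- ===== PRECONDITION & SPEC =====
def Spec_XPathToDictPath (path : String) (out : String) : Prop := out = XPathToDictPath_alt path
instance (path : String) (out : String) : Decidable (Spec_XPathToDictPath path out) := by unfold Spec_XPathToDictPath; infer_instance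

-- ===== CLAIM (what is proved, stated in full; the proofs are below) =====
def Claim_equal_XPathToDictPath : Prop := ∀ (path : String), Dom_XPathToDictPath path → Spec_XPathToDictPath path (XPathToDictPath path)

-- ===== LEMMAS AND PROOFS =====

-- middle of the nested string: nest F = "{'" ++ pvMid F ++ "}"
def pvMid : List String → String
  | [] => "'"
  | x :: xs => x ++ "': {'" ++ pvMid xs ++ "}"

def pvBraces (k : Nat) : String := String.ofList (List.replicate k '}')

theorem pvBraces_snoc (k : Nat) : pvBraces k ++ "}" = pvBraces (k + 1) := by
  have h1 : ("}" : String) = String.ofList ['}'] := by decide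
  simp only [pvBraces, h1, ← String.ofList_append]
  rw [← List.replicate_succ']

theorem pvBraces_succ' (k : Nat) : pvBraces (k + 1) = "}" ++ pvBraces k := by
  have h1 : ("}" : String) = String.ofList ['}'] := by decide
  simp only [pvBraces, h1, ← String.ofList_append]
  rw [List.singleton_append, ← List.replicate_succ]

-- A's guarded fold over all items equals the unguarded fold over the filtered items
theorem pvGuard_eq (L : List String) (st : String × String) :
    L.foldl
      (fun (st : String × String) item =>
        if item ≠ "" then (st.1 ++ item ++ "': {'", st.2 ++ "}") else st) st
    = (L.filter (fun i => i ≠ "")).foldl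
        (fun (st : String × String) item => (st.1 ++ item ++ "': {'", st.2 ++ "}")) st := by
  induction L generalizing st with
  | nil => rfl
  | cons x xs ih =>
    by_cases hx : x = ""
    · rw [List.foldl_cons, if_neg (by simp [hx]),
        List.filter_cons_of_neg (by simp [hx])]
      exact ih st
    · rw [List.foldl_cons, if_pos hx,
        List.filter_cons_of_pos (by simp [hx]), List.foldl_cons]
      exact ih _

theorem pvAfold_eq (F : List String) (r : String) (k : Nat) :
    (F.foldl
      (fun (st : String × String) item => (st.1 ++ item ++ "': {'", st.2 ++ "}"))
      (r, pvBraces k)).1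
    ++ "'" ++
    (F.foldl
      (fun (st : String × String) item => (st.1 ++ item ++ "': {'", st.2 ++ "}"))
      (r, pvBraces k)).2
    = r ++ pvMid F ++ pvBraces k := by
  induction F generalizing r k with
  | nil => simp [pvMid, String.append_assoc]
  | cons x xs ih =>
    rw [List.foldl_cons]
    rw [show ((r, pvBraces k).1 ++ x ++ "': {'", (r, pvBraces k).2 ++ "}")
        = (r ++ x ++ "': {'", pvBraces (k + 1)) from by rw [pvBraces_snoc]]
    rw [ih (r ++ x ++ "': {'") (k + 1), pvBraces_succ']
    simp [pvMid, String.append_assoc]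

theorem pvNest_eq (F : List String) :
    F.reverse.foldl (fun acc item => "{'" ++ item ++ "': " ++ acc ++ "}") "{''}"
      = "{'" ++ pvMid F ++ "}" := by
  rw [List.foldl_reverse]
  induction F with
  | nil => decide
  | cons x xs ih =>
    simp only [List.foldr_cons, ih, pvMid]
    have h : ("': " : String) ++ "{'" = "': {'" := by decide
    simp only [String.append_assoc, ← h]

-- ===== VERDICT (by name: the statement is the Claim_ definition above) =====
theorem XPathToDictPath_spec : Claim_equal_XPathToDictPath := by
  intro path _
  simp only [Spec_XPathToDictPath, XPathToDictPath, XPathToDictPath_alt]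
  rw [pvGuard_eq, pvNest_eq]
  have hA := pvAfold_eq
    (((PySem.Str.split? path "/").getD []).filter (fun i => i ≠ "")) "{'" 1
  have hb : pvBraces 1 = "}" := by decide
  rw [hb] at hA
  rw [hA]
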